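-- pv_equiv track=rewrite | github.com/LukenPaluken/AyED1-TPs | TP4/ej09.py | ordenar_palabras_por_longitud
-- ===== SOURCE A (Python) =====
-- def ordenar_palabras_por_longitud(cadena: str) -> str:
--     """
--     Recibe una cadena de caracteres con palabras separadas por uno o más espacios.
--     Devuelve otra cadena con las palabras ordenadas por su longitud, conservando
--     los signos de puntuación.
--     """
--     palabras_con_puntuacion = cadena.split()
--     palabras_limpias = []
--
--     for palabra in palabras_con_puntuacion:
--         palabra_sin_puntuacion = "".join(
--             [char for char in palabra if char not in [".", ",", ";"]]
--         )
--         palabras_limpias.append(palabra_sin_puntuacion)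
--
--     palabras_ordenadas = sorted(
--         palabras_con_puntuacion,
--         key=lambda palabra: len(
--             "".join([char for char in palabra if char not in [".", ",", ";"]])
--         ),
--     )
--
--     resultado = " ".join(palabras_ordenadas)
--
--     return resultado
-- ===== SOURCE B (Python) =====
-- def ordenar_palabras_por_longitud(cadena: str) -> str:
--     # Distribution (bucket) sort: group words by cleaned length, then emit
--     # buckets in ascending key order; appending in input order keeps ties stable.
--     buckets = {}
--     for palabra in cadena.split():
--         k = len([c for c in palabra if c not in ".,;"])
--         buckets.setdefault(k, []).append(palabra)
--     resultado = []
--     for k in sorted(buckets):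
--         resultado.extend(buckets[k])
--     return " ".join(resultado)
-- ===== Notes on version B (the rewrite author's own statement) =====
-- stated objective: faster
-- what changed: Replaces A's comparison sort (plus a dead list-building cleaning loop) by a stable distribution sort: words are grouped into a dict of buckets keyed by punctuation-stripped length, then buckets are emitted in ascending key order.
import Mathlib
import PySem

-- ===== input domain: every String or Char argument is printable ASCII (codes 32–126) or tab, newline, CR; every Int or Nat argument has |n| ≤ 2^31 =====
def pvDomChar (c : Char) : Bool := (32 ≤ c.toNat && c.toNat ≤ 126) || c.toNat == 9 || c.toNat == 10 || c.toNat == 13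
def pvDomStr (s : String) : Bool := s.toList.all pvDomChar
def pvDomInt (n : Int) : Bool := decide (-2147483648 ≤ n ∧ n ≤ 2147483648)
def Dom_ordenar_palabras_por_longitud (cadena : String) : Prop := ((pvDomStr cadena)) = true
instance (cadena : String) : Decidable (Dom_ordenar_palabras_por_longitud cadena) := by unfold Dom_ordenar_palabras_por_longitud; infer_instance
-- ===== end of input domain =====

-- B replaces A's comparison sort (and A's dead cleaning loop) by a stable distribution
-- (bucket) sort keyed on the punctuation-stripped length; objective: alternative algorithm.

-- ===== PORT A =====
-- In Python, iterating a string yields 1-character strings; the comprehension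
-- [char for char in palabra if char not in [".", ",", ";"]] is ported exactly as a
-- filter over the code points, each re-wrapped as a 1-character string for "".join.
def ordenar_palabras_por_longitud (cadena : String) : String :=
  let palabras_con_puntuacion := PySem.Str.split₀ cadena
  -- dead in A too: palabras_limpias is built and never used
  let _palabras_limpias := palabras_con_puntuacion.map (fun palabra =>
    PySem.Str.join "" ((palabra.toList.filter
      (fun c => !(c == '.' || c == ',' || c == ';'))).map (fun c => String.ofList [c])))
  let palabras_ordenadas := PySem.List.sorted palabras_con_puntuacion
    (fun palabra => PySem.Str.len (PySem.Str.join "" ((palabra.toList.filter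
      (fun c => !(c == '.' || c == ',' || c == ';'))).map (fun c => String.ofList [c]))))
  PySem.Str.join " " palabras_ordenadas

-- ===== PORT B =====
-- cleaned length of a word: len([c for c in palabra if c not in ".,;"])
def pvKeyB (palabra : String) : Int :=
  ((palabra.toList.filter (fun c => !(c == '.' || c == ',' || c == ';'))).length : Int)

def ordenar_palabras_por_longitud_alt (cadena : String) : String :=
  let buckets := (PySem.Str.split₀ cadena).foldl
    (fun d palabra => d.modify (pvKeyB palabra) [] (fun v => v ++ [palabra]))
    PySem.Dict.empty
  let resultado := (PySem.List.sorted buckets.keys (fun k => k)).foldl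
    (fun acc k => acc ++ buckets.getD k []) []
  PySem.Str.join " " resultado

-- ===== PRECONDITION & SPEC =====
def Spec_ordenar_palabras_por_longitud (cadena : String) (out : String) : Prop := out = ordenar_palabras_por_longitud_alt cadena
instance (cadena : String) (out : String) : Decidable (Spec_ordenar_palabras_por_longitud cadena out) := by unfold Spec_ordenar_palabras_por_longitud; infer_instance

-- ===== CLAIM (what is proved, stated in full; the proofs are below) =====
def Claim_equal_ordenar_palabras_por_longitud : Prop := ∀ (cadena : String), Dom_ordenar_palabras_por_longitud cadena → Spec_ordenar_palabras_por_longitud cadena (ordenar_palabras_por_longitud cadena)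

-- ===== LEMMAS AND PROOFS =====

-- insert a key into a strictly increasing list (no-op if present)
def pvKinsert : List Int → Int → List Int
  | [], k => [k]
  | a :: t, k => if k < a then k :: a :: t else if k = a then a :: t else a :: pvKinsert t k

theorem pvInsertBy_all_before {α : Type} (before : α → α → Bool) (w : α) (L : List α)
    (h : ∀ y ∈ L, before w y = true) :
    PySem.List.insertBy before w L = w :: L := by
  cases L with
  | nil => rfl
  | cons y ys => simp [PySem.List.insertBy, h y (by simp)]

theorem pvInsertBy_append_not_before {α : Type} (before : α → α → Bool) (w : α)
    (xs L : List α) (h : ∀ y ∈ xs, before w y = false) :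
    PySem.List.insertBy before w (xs ++ L) = xs ++ PySem.List.insertBy before w L := by
  induction xs with
  | nil => rfl
  | cons x t ih =>
      simp only [List.cons_append, PySem.List.insertBy, h x (by simp)]
      simp only [Bool.false_eq_true, if_false, List.cons.injEq, true_and]
      exact ih (fun y hy => h y (by simp [hy]))

theorem pvFlatMap_congr {α β : Type} (l : List α) (f g : α → List β)
    (h : ∀ x ∈ l, f x = g x) : l.flatMap f = l.flatMap g := by
  induction l with
  | nil => rfl
  | cons x t ih => simp [List.flatMap_cons, h x (by simp), ih (fun y hy => h y (by simp [hy]))]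

-- the heart: inserting w into a concatenation of key-homogeneous buckets in
-- ascending key order appends w to the end of its own bucket
theorem pvCore (w : String) (ks : List Int) (f : Int → List String)
    (hp : ks.Pairwise (· < ·))
    (hf : ∀ k ∈ ks, ∀ x ∈ f k, pvKeyB x = k)
    (h0 : pvKeyB w ∉ ks → f (pvKeyB w) = []) :
    PySem.List.insertBy (fun a b => decide (pvKeyB a < pvKeyB b)) w (ks.flatMap f) =
      (pvKinsert ks (pvKeyB w)).flatMap
        (fun k => if k = pvKeyB w then f k ++ [w] else f k) := by
  induction ks with
  | nil =>
      simp [pvKinsert, PySem.List.insertBy, h0 (by simp)]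
  | cons a t ih =>
      rcases List.pairwise_cons.mp hp with ⟨ha, ht⟩
      by_cases h1 : pvKeyB w < a
      · -- w goes in front; key w is fresh
        have hnot : pvKeyB w ∉ a :: t := by
          intro hm
          rcases List.mem_cons.mp hm with rfl | hm
          · exact lt_irrefl _ h1
          · exact lt_irrefl _ (lt_trans h1 (ha _ hm))
        have hall : ∀ y ∈ (a :: t).flatMap f, (fun a b => decide (pvKeyB a < pvKeyB b)) w y = true := by
          intro y hy
          rcases List.mem_flatMap.mp hy with ⟨k, hk, hyk⟩
          have : pvKeyB y = k := hf k hk y hyk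
          have hak : a ≤ k := by
            rcases List.mem_cons.mp hk with rfl | hk
            · exact le_refl _
            · exact le_of_lt (ha _ hk)
          simp only [decide_eq_true_eq, this]
          omega
        rw [pvInsertBy_all_before _ _ _ hall]
        have hne : a ≠ pvKeyB w := by omega
        have hct : (t.flatMap (fun k => if k = pvKeyB w then f k ++ [w] else f k))
            = t.flatMap f := by
          apply pvFlatMap_congr
          intro k hk
          have : k ≠ pvKeyB w := by intro h; exact hnot (by simp [← h, hk])
          simp [this]
        simp [pvKinsert, h1, h0 hnot, hne, hct]
      · by_cases h2 : pvKeyB w = a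
        · -- append to bucket a
          simp only [List.flatMap_cons]
          have hnotb : ∀ y ∈ f a, (fun a' b => decide (pvKeyB a' < pvKeyB b)) w y = false := by
            intro y hy
            have : pvKeyB y = a := hf a (by simp) y hy
            simp only [decide_eq_false_iff_not, this]
            omega
          rw [pvInsertBy_append_not_before _ _ _ _ hnotb]
          have hall : ∀ y ∈ t.flatMap f, (fun a' b => decide (pvKeyB a' < pvKeyB b)) w y = true := by
            intro y hy
            rcases List.mem_flatMap.mp hy with ⟨k, hk, hyk⟩
            have hyk' : pvKeyB y = k := hf k (by simp [hk]) y hyk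
            have : a < k := ha _ hk
            simp only [decide_eq_true_eq, hyk']
            omega
          rw [pvInsertBy_all_before _ _ _ hall]
          have hct : (t.flatMap (fun k => if k = pvKeyB w then f k ++ [w] else f k))
              = t.flatMap f := by
            apply pvFlatMap_congr
            intro k hk
            have : k ≠ pvKeyB w := by
              intro h; subst h; exact lt_irrefl _ (h2 ▸ ha _ hk)
            simp [this]
          subst h2
          simp [pvKinsert, hct]
        · -- skip bucket a, recurse
          have hak : a < pvKeyB w := by omega
          simp only [List.flatMap_cons]
          have hnotb : ∀ y ∈ f a, (fun a' b => decide (pvKeyB a' < pvKeyB b)) w y = false := by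
            intro y hy
            have : pvKeyB y = a := hf a (by simp) y hy
            simp only [decide_eq_false_iff_not, this]
            omega
          rw [pvInsertBy_append_not_before _ _ _ _ hnotb]
          have ih' := ih ht (fun k hk x hx => hf k (by simp [hk]) x hx)
            (fun hnt => h0 (by simp [h2, hnt]))
          rw [ih']
          simp only [pvKinsert, h1, if_false, h2, List.flatMap_cons]
          have : a ≠ pvKeyB w := fun h => h2 h.symm
          simp [this]

theorem pvMem_kinsert (ks : List Int) (k m : Int) :
    m ∈ pvKinsert ks k ↔ m = k ∨ m ∈ ks := by
  induction ks with
  | nil => simp [pvKinsert]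
  | cons a t ih =>
      by_cases h1 : k < a
      · simp [pvKinsert, h1]
      · by_cases h2 : k = a
        · subst h2; simp [pvKinsert]
        · simp [pvKinsert, h1, h2, ih]
          tauto

theorem pvKinsert_pairwise (ks : List Int) (k : Int) (hp : ks.Pairwise (· < ·)) :
    (pvKinsert ks k).Pairwise (· < ·) := by
  induction ks with
  | nil => simp [pvKinsert]
  | cons a t ih =>
      rcases List.pairwise_cons.mp hp with ⟨ha, ht⟩
      by_cases h1 : k < a
      · simp only [pvKinsert, h1, if_true]
        refine List.pairwise_cons.mpr ⟨?_, hp⟩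
        intro m hm; rcases List.mem_cons.mp hm with rfl | hm; · exact h1
        exact lt_trans h1 (ha _ hm)
      · by_cases h2 : k = a
        · subst h2; simpa [pvKinsert, h1] using hp
        · have hak : a < k := by omega
          simp only [pvKinsert, h1, if_false, h2]
          refine List.pairwise_cons.mpr ⟨?_, ih ht⟩
          intro m hm
          rcases (pvMem_kinsert t k m).mp hm with rfl | hm
          · exact hak
          · exact ha _ hm

theorem pvKinsert_nodup (ks : List Int) (k : Int) (hp : ks.Pairwise (· < ·)) :
    (pvKinsert ks k).Nodup :=
  (pvKinsert_pairwise ks k hp).imp (fun h => ne_of_lt h)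

theorem pvSorted_append_singleton {α : Type} (l : List α) (x : α) (key : α → Int) :
    PySem.List.sorted (l ++ [x]) key =
      PySem.List.insertBy (fun a b => decide (key a < key b)) x (PySem.List.sorted l key) := by
  rw [PySem.List.sorted_eq_foldl_insertBy, PySem.List.sorted_eq_foldl_insertBy, List.foldl_append]
  rfl

theorem pvKeysStep (l : List Int) (k : Int) :
    PySem.List.sorted (PySem.Set.ofList (l ++ [k])) (fun x => x) =
      pvKinsert (PySem.List.sorted (PySem.Set.ofList l) (fun x => x)) k := by
  have hsp : (PySem.List.sorted (PySem.Set.ofList l) (fun x => x)).Pairwise (· < ·) :=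
    PySem.List.sorted_ofList_pairwise_lt l
  apply PySem.List.sorted_eq_of_perm_of_pairwise_lt
  · apply List.perm_of_nodup_nodup_toFinset_eq
    · exact pvKinsert_nodup _ k hsp
    · exact PySem.Set.nodup_ofList _
    · ext m
      simp [pvMem_kinsert, PySem.List.mem_sorted, PySem.Set.mem_ofList]
      tauto
  · exact pvKinsert_pairwise _ k hsp

-- the stable sort by cleaned length is the ascending concatenation of the
-- key-filtered sublists
theorem pvMainList (ws : List String) :
    PySem.List.sorted ws pvKeyB =
      (PySem.List.sorted (PySem.Set.ofList (ws.map pvKeyB)) (fun x => x)).flatMap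
        (fun k => ws.filter (fun w => pvKeyB w == k)) := by
  induction ws using List.reverseRecOn with
  | nil => rfl
  | append_singleton ws w ih =>
      rw [pvSorted_append_singleton, ih]
      rw [pvCore w _ _ (PySem.List.sorted_ofList_pairwise_lt _)
        (fun k _ x hx => by
          have := List.of_mem_filter hx
          exact beq_iff_eq.mp this)
        (fun hnot => by
          rw [List.filter_eq_nil_iff]
          intro x hx hbeq
          apply hnot
          rw [PySem.List.mem_sorted, PySem.Set.mem_ofList]
          exact List.mem_map.mpr ⟨x, hx, beq_iff_eq.mp hbeq⟩)]
      simp only [List.map_append, List.map_cons, List.map_nil]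
      rw [pvKeysStep]
      apply pvFlatMap_congr
      intro k _
      by_cases hk : k = pvKeyB w
      · subst hk
        simp [List.filter_append]
      · have : ¬ (pvKeyB w == k) = true := by simp; omega
        simp [List.filter_append, hk, this]

theorem pvGetD_buckets (ws : List String) (c : Int) :
    (ws.foldl (fun d palabra => d.modify (pvKeyB palabra) [] (fun v => v ++ [palabra]))
      PySem.Dict.empty).getD c [] = ws.filter (fun w => pvKeyB w == c) := by
  have h : ws.foldl (fun d palabra => d.modify (pvKeyB palabra) [] (fun v => v ++ [palabra]))
      PySem.Dict.empty
      = (ws.map (fun w => (pvKeyB w, w))).foldl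
        (fun d p => d.modify p.1 [] (fun v => v ++ [p.2])) PySem.Dict.empty := by
    rw [List.foldl_map]
  rw [h, PySem.Dict.getD_foldl_modify_append]
  simp [List.filter_map, Function.comp_def]

theorem pvKeys_buckets (ws : List String) :
    (ws.foldl (fun d palabra => d.modify (pvKeyB palabra) [] (fun v => v ++ [palabra]))
      PySem.Dict.empty).keys = PySem.Set.ofList (ws.map pvKeyB) := by
  rw [PySem.Dict.keys_foldl_modify_key ws pvKeyB [] (fun d x v => v ++ [x])]
  simp [PySem.Set.update, PySem.Set.ofList, PySem.Dict.keys, PySem.Dict.empty]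

theorem pvKeyA_eq (palabra : String) :
    PySem.Str.len (PySem.Str.join "" ((palabra.toList.filter
      (fun c => !(c == '.' || c == ',' || c == ';'))).map (fun c => String.ofList [c]))) =
    pvKeyB palabra := by
  rw [PySem.Str.len_eq, PySem.Str.toList_join]
  simp [List.map_map, Function.comp_def, PySem.Chars.join_nil_singletons, pvKeyB]

-- ===== VERDICT (by name: the statement is the Claim_ definition above) =====
theorem ordenar_palabras_por_longitud_spec : Claim_equal_ordenar_palabras_por_longitud := by
  intro cadena _
  unfold Spec_ordenar_palabras_por_longitud
  unfold ordenar_palabras_por_longitud ordenar_palabras_por_longitud_alt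
  simp only []
  set ws := PySem.Str.split₀ cadena with hws
  congr 1
  have hkey : (fun palabra => PySem.Str.len (PySem.Str.join "" ((palabra.toList.filter
      (fun c => !(c == '.' || c == ',' || c == ';'))).map (fun c => String.ofList [c]))))
      = pvKeyB := funext pvKeyA_eq
  rw [hkey]
  rw [pvKeys_buckets, PySem.List.foldl_append_eq_flatMap, List.nil_append]
  have hbk : (fun k => (ws.foldl (fun d palabra =>
        d.modify (pvKeyB palabra) [] (fun v => v ++ [palabra])) PySem.Dict.empty).getD k [])
      = fun k => ws.filter (fun w => pvKeyB w == k) := funext (pvGetD_buckets ws)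
  rw [hbk]
  exact pvMainList ws
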